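-- pv_equiv track=rewrite | github.com/JohnStokes228/minimum_prime_hit_set | hit_set_algorithms/exhaustive.py | check_if_solved
-- ===== SOURCE A (Python) =====
-- def check_if_solved(
--         remaining,
--         sols,
-- ):
--     """Check if sols is enough to solve MinHitSet alg.
--
--     Parameters
--     ----------
--     remaining : list
--         List of lists of remaining decompositions to check if sols hit.
--     sols : list
--         List of integers that form an at least partial solution to MinHitSet algorithm.
--
--     Returns
--     -------
--     list
--         List of remaining solutions not hit by sols.
--     """
--     check = []
--
--     for decomposition in remaining:
--         check.append(any(item in decomposition for item in sols))
--
--     if all(check):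
--         return []
--
--     else:
--         indices = [i for i, x in enumerate(check) if x == False]
--         remaining = [remaining[i] for i in indices]
--
--         return remaining
-- ===== SOURCE B (Python) =====
-- def check_if_solved(remaining, sols):
--     """Progressive culling: for each solution element, discard the decompositions it hits."""
--     survivors = list(remaining)
--     for item in sols:
--         survivors = [d for d in survivors if item not in d]
--     return survivors
-- ===== Notes on version B (the rewrite author's own statement) =====
-- stated objective: alternative
-- what changed: Instead of A's per-decomposition boolean table, all() test and index-based rebuild, B traverses sols and progressively culls from the survivor list every decomposition the current solution element hits; the order of traversal is swapped (outer loop over sols, not remaining) and no boolean/index bookkeeping exists.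
import Mathlib
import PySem

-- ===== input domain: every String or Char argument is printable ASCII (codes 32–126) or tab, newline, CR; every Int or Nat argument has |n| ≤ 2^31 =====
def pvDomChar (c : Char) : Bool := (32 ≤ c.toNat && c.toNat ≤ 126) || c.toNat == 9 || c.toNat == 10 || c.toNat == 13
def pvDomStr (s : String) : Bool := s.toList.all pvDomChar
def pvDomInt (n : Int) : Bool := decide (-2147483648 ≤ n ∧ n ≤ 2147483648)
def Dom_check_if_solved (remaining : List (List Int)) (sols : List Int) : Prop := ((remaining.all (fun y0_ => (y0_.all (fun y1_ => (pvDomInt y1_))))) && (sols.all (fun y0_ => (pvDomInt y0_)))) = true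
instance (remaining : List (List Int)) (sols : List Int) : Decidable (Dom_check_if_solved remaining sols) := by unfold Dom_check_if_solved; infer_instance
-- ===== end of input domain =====

-- B replaces A's boolean-table/all()/index-rebuild pipeline over remaining by a loop over sols that progressively culls hit decompositions (alternative decomposition, same cost).
-- ===== PORT A =====
def check_if_solved (remaining : List (List Int)) (sols : List Int) : List (List Int) :=
  -- check = []; for decomposition in remaining: check.append(any(item in decomposition for item in sols))
  let check : List Bool :=
    remaining.foldl (fun acc decomposition => acc ++ [sols.any (fun item => decomposition.contains item)]) []
  if check.all (fun x => x) then
    []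
  else
    -- indices = [i for i, x in enumerate(check) if x == False]
    let indices : List Int := ((PySem.List.enumerate check 0).filter (fun p => p.2 == false)).map (fun p => p.1)
    -- remaining = [remaining[i] for i in indices]  (indices are valid, so pyGet? is some)
    indices.map (fun i => (PySem.List.pyGet? remaining i).getD [])

-- ===== PORT B =====
def check_if_solved_alt (remaining : List (List Int)) (sols : List Int) : List (List Int) :=
  -- survivors = list(remaining); for item in sols: survivors = [d for d in survivors if item not in d]
  sols.foldl (fun survivors item => survivors.filter (fun d => !(d.contains item))) remaining

-- ===== PRECONDITION & SPEC =====
def Spec_check_if_solved (remaining : List (List Int)) (sols : List Int) (out : List (List Int)) : Prop := out = check_if_solved_alt remaining sols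
instance (remaining : List (List Int)) (sols : List Int) (out : List (List Int)) : Decidable (Spec_check_if_solved remaining sols out) := by unfold Spec_check_if_solved; infer_instance

-- ===== CLAIM (what is proved, stated in full; the proofs are below) =====
def Claim_equal_check_if_solved : Prop := ∀ (remaining : List (List Int)) (sols : List Int), Dom_check_if_solved remaining sols → Spec_check_if_solved remaining sols (check_if_solved remaining sols)

-- ===== LEMMAS AND PROOFS =====

theorem pick_lemma (sols : List Int) (l : List (List Int)) (pre : List (List Int)) :
    (((PySem.List.enumerate (l.map (fun d => sols.any (fun item => d.contains item))) (pre.length : Int)).filter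
        (fun p => p.2 == false)).map (fun p => p.1)).map
      (fun i => (PySem.List.pyGet? (pre ++ l) i).getD []) =
    l.filter (fun d => !(sols.any (fun item => d.contains item))) := by
  induction l generalizing pre with
  | nil => simp [PySem.List.enumerate_nil]
  | cons a t ih =>
    have h1 : PySem.List.pyGet? (pre ++ a :: t) (pre.length : Int) = some a := by
      simpa using PySem.List.pyGet?_append_length (pre := pre) (y := a) (ys := t)
    have h2 := ih (pre ++ [a])
    simp only [List.append_assoc, List.singleton_append, List.length_append, List.length_cons,
      List.length_nil, Nat.cast_add, Nat.cast_one, Nat.zero_add] at h2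
    simp only [List.map_cons, PySem.List.enumerate_cons, List.filter_cons]
    split_ifs with h h' <;> simp_all
    rename_i hforall
    obtain ⟨x, hx, hxa⟩ := h
    exact hforall x hx hxa

theorem check_foldl (remaining : List (List Int)) (sols : List Int) :
    remaining.foldl (fun acc decomposition => acc ++ [sols.any (fun item => decomposition.contains item)]) [] =
      remaining.map (fun d => sols.any (fun item => d.contains item)) := by
  simpa using PySem.List.foldl_append_singleton_eq_map
    (f := fun d => sols.any (fun item => d.contains item)) (l := remaining) ([])

-- B's cull loop over sols computes the same list as one filter over remaining.
theorem cull_eq_filter (sols : List Int) (remaining : List (List Int)) :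
    sols.foldl (fun survivors item => survivors.filter (fun d => !(d.contains item))) remaining =
      remaining.filter (fun d => !(sols.any (fun item => d.contains item))) := by
  induction sols generalizing remaining with
  | nil => simp
  | cons s t ih =>
    simp only [List.foldl_cons, ih, List.filter_filter]
    congr 1
    funext d
    simp [Bool.and_comm]

-- ===== VERDICT (by name: the statement is the Claim_ definition above) =====
theorem check_if_solved_spec : Claim_equal_check_if_solved := by
  intro remaining sols _
  unfold Spec_check_if_solved check_if_solved check_if_solved_alt
  simp only [check_foldl, cull_eq_filter]
  split
  · rename_i hall
    rw [Eq.comm, List.filter_eq_nil_iff]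
    intro d hd
    have := (List.all_eq_true.mp hall) _ (List.mem_map_of_mem hd)
    simp_all
  · simpa using pick_lemma sols remaining []
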